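-- pv_equiv track=rewrite | github.com/pawelkostek1/CS5340 | bayes_ball.py | mark_v_struct
-- ===== SOURCE A (Python) =====
-- def get_parents(graph, node):
--     """Helper function that return a list
--     of parents for a given node in a graph
--
--     Args:
--         graph (dict): the Bayesian network
--         node (int): a node of the graph
--
--     Returns:
--         parents(list): the list of parents for a given node
--     """
--     parents = []
--
--     for parent in graph:
--         if node in graph[parent]:
--             parents.append(parent)
--     return parents
--
-- def  mark_v_struct(graph, Z):
--     """Helper function that traverse the graph
--     from leaves to the roots, marking all nodes
--     that are in Z or have descendants in Z.
--
--     Args: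
--         graph (dict): the Bayesian network
--         Z (list): list of nodes in set Z
--
--     Returns:
--         A (list): list of nodes that are in Z or have descendants in Z
--     """
--     A = []
--     for z in Z:
--         l = [z]
--         a = []
--         while len(l):
--             C = l.pop()
--             if C not in A:
--                 for parent in get_parents(graph, C):
--                     if parent not in Z:
--                         l.append(parent)
--                 a.append(C)
--         A.append(a)
--     return A
-- ===== SOURCE B (Python) =====
-- def mark_v_struct(graph, Z):
--     # Build the child -> parents map once (graph iteration order), then emit each
--     # per-z list by a recursive preorder DFS: a node, then the subtree of each of
--     # its non-Z parents, last-listed parent first (= A's pop-from-the-end order).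
--     parents_of = {}
--     for parent in graph:
--         for child in dict.fromkeys(graph[parent]):
--             parents_of.setdefault(child, []).append(parent)
--
--     def visit(c):
--         out = [c]
--         for p in reversed(parents_of.get(c, [])):
--             if p not in Z:
--                 out.extend(visit(p))
--         return out
--
--     return [visit(z) for z in Z]
-- ===== Notes on version B (the rewrite author's own statement) =====
-- stated objective: faster
-- what changed: B precomputes the child->parents reverse-adjacency map in one pass and replaces A's explicit-stack loop with a recursive preorder DFS per z (visiting non-Z parents last-listed first, which reproduces A's pop order exactly), eliminating the per-pop whole-graph get_parents scan and A's vacuous 'C not in A' test (an int never equals a list).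
import Mathlib
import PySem

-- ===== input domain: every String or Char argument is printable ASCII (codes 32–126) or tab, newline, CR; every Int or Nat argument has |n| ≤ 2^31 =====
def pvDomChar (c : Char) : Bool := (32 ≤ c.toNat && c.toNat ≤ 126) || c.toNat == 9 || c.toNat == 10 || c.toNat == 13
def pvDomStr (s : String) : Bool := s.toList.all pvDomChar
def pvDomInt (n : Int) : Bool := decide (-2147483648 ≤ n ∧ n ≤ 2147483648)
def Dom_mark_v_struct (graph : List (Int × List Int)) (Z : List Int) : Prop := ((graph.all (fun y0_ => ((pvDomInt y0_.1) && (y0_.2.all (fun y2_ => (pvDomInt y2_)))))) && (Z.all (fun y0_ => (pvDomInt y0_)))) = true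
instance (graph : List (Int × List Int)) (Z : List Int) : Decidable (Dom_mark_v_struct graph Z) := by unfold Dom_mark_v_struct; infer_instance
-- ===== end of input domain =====

-- B builds a child->parents map once and emits each per-z list by a recursive
-- preorder DFS (last-listed parent first) instead of A's per-pop whole-graph
-- rescans with an explicit stack; same return value.

-- ===== PORT A =====

-- Python's 'C == x' for an int C and a list x is always False ('C not in A' compares
-- the popped int with the per-z LISTS stored in A) — ported exactly as that test.
def intEqList (_ : Int) (_ : List Int) : Bool := false

-- get_parents: scan every (parent, children) entry; 'graph[parent]' is the entry's value
-- (graph encodes a Python dict, keys distinct, so first-match lookup = the pair's value).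
def get_parents (graph : List (Int × List Int)) (node : Int) : List Int :=
  graph.foldl (fun parents pc => if pc.2.contains node then parents ++ [pc.1] else parents) []

-- The while loop of A. The stack is kept top-first (Python appends/pops at the list END;
-- 'l.append(parent)' = cons onto the top, 'l.pop()' = take the head). Fuel only makes the
-- recursion total: Python A diverges when the walk meets a cycle (excluded by Pre_).
def markLoopA (graph : List (Int × List Int)) (Z : List Int) (A : List (List Int)) :
    Nat → List Int → List Int → List Int
  | 0, _, a => a
  | _ + 1, [], a => a
  | fuel + 1, C :: rest, a =>
    if A.any (intEqList C) then
      markLoopA graph Z A fuel rest a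
    else
      markLoopA graph Z A fuel
        ((get_parents graph C).foldl (fun l p => if Z.contains p then l else p :: l) rest)
        (a ++ [C])

def pvFuel (graph : List (Int × List Int)) : Nat := (graph.length + 2) ^ (graph.length + 2)

def mark_v_struct (graph : List (Int × List Int)) (Z : List Int) : List (List Int) :=
  Z.foldl (fun A z => A ++ [markLoopA graph Z A (pvFuel graph) [z] []]) []

-- ===== PORT B =====

-- 'for parent in graph: for child in dict.fromkeys(graph[parent]): parents_of.setdefault(child, []).append(parent)'
def buildParents (graph : List (Int × List Int)) : PySem.Dict Int (List Int) :=
  graph.foldl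
    (fun d pc => (PySem.List.dedup pc.2).foldl (fun d c => d.modify c [] (· ++ [pc.1])) d)
    PySem.Dict.empty

-- B's recursive 'visit', on a pending list of nodes: a node c contributes itself and then
-- the visits of its non-Z parents, last-listed first ('reversed'). The threaded fuel (one
-- unit per emitted node, clamped with 'min' only so the recursion is structural on it)
-- is a totalisation device absent from the Python: Python B recurses forever exactly
-- where A diverges (a reachable cycle, excluded by Pre_).
def visitList (pmap : PySem.Dict Int (List Int)) (Z : List Int) :
    Nat → List Int → List Int × Nat
  | f, [] => ([], f)
  | 0, _ :: _ => ([], 0)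
  | f + 1, c :: rest =>
    let r := visitList pmap Z f ((pmap.getD c []).reverse.filter (fun p => !(Z.contains p)))
    let r2 := visitList pmap Z (min r.2 f) rest
    (c :: (r.1 ++ r2.1), r2.2)
  termination_by f _ => f
  decreasing_by
  · omega
  · exact Nat.lt_succ_of_le (Nat.min_le_right _ _)

-- '[visit(z) for z in Z]'
def mark_v_struct_alt (graph : List (Int × List Int)) (Z : List Int) : List (List Int) :=
  let pmap := buildParents graph
  Z.map (fun z => (visitList pmap Z (pvFuel graph) [z]).1)

-- ===== PRECONDITION & SPEC =====

-- parents of v that get pushed by the walk (parents not in Z)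
def pvStep (graph : List (Int × List Int)) (Z : List Int) (v : Int) : List Int :=
  (graph.filter (fun pc => pc.2.contains v && !(Z.contains pc.1))).map (·.1)

-- closure of S under pvStep, reached after enough rounds
def pvClose (graph : List (Int × List Int)) (Z : List Int) : Nat → List Int → List Int
  | 0, S => S
  | n + 1, S => pvClose graph Z n (PySem.List.dedup (S ++ S.flatMap (pvStep graph Z)))

-- Pre_ excludes exactly the inputs on which Python A does not return: the ancestor walk
-- from some z ∈ Z reaches a node lying on a cycle, so A's while loop runs forever.
def Pre_mark_v_struct (graph : List (Int × List Int)) (Z : List Int) : Prop :=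
  ((pvClose graph Z (graph.length + Z.length + 1) Z).all
    (fun v => !((pvClose graph Z (graph.length + Z.length + 1) (pvStep graph Z v)).contains v))) = true

instance (graph : List (Int × List Int)) (Z : List Int) : Decidable (Pre_mark_v_struct graph Z) := by
  unfold Pre_mark_v_struct; infer_instance

def pvWitness_mark_v_struct : (List (Int × List Int)) × List Int :=
  ([(1, [2]), (2, [])], [2])

def Spec_mark_v_struct (graph : List (Int × List Int)) (Z : List Int) (out : List (List Int)) : Prop := out = mark_v_struct_alt graph Z
instance (graph : List (Int × List Int)) (Z : List Int) (out : List (List Int)) : Decidable (Spec_mark_v_struct graph Z out) := by unfold Spec_mark_v_struct; infer_instance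

-- ===== CLAIM (what is proved, stated in full; the proofs are below) =====
def Claim_equal_mark_v_struct : Prop := ∀ (graph : List (Int × List Int)) (Z : List Int), Dom_mark_v_struct graph Z → Pre_mark_v_struct graph Z → Spec_mark_v_struct graph Z (mark_v_struct graph Z)

-- ===== LEMMAS AND PROOFS =====

lemma any_intEqList (C : Int) (A : List (List Int)) : A.any (intEqList C) = false := by
  induction A with
  | nil => rfl
  | cons x xs ih => simp [intEqList, ih]

lemma get_parents_eq_filter_map (graph : List (Int × List Int)) (node : Int) :
    get_parents graph node = (graph.filter (fun pc => pc.2.contains node)).map (·.1) := by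
  unfold get_parents
  rw [PySem.List.foldl_append_if (fun pc => pc.2.contains node) (·.1) graph []]
  simp

lemma filter_beq_of_nodup (l : List Int) (c : Int) (hnd : l.Nodup) :
    l.filter (fun x => x == c) = if c ∈ l then [c] else [] := by
  induction l with
  | nil => simp
  | cons x xs ih =>
    rcases List.nodup_cons.mp hnd with ⟨hx, hxs⟩
    by_cases hxc : x = c
    · subst hxc
      have hnil : xs.filter (fun a => a == x) = [] := by
        apply List.filter_eq_nil_iff.mpr
        intro a ha
        simp only [beq_iff_eq]
        intro h; exact hx (h ▸ ha)
      simp [hnil]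
    · rw [List.filter_cons, ih hxs]
      by_cases h : c ∈ xs <;> simp [h, hxc, Ne.symm hxc]

lemma dedup_filter_beq (cs : List Int) (c : Int) :
    (PySem.List.dedup cs).filter (fun c' => c' == c) = if cs.contains c then [c] else [] := by
  rw [filter_beq_of_nodup _ c (PySem.List.nodup_dedup cs)]
  simp

lemma buildParents_inner (p : Int) (cs : List Int) (d : PySem.Dict Int (List Int)) (c : Int) :
    ((PySem.List.dedup cs).foldl (fun d c' => d.modify c' [] (· ++ [p])) d).getD c []
      = d.getD c [] ++ (if cs.contains c then [p] else []) := by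
  have hmap : (PySem.List.dedup cs).foldl (fun d c' => d.modify c' [] (· ++ [p])) d
      = ((PySem.List.dedup cs).map (fun c' => (c', p))).foldl
          (fun d q => d.modify q.1 [] (· ++ [q.2])) d := by
    rw [List.foldl_map]
  rw [hmap, PySem.Dict.getD_foldl_modify_append]
  congr 1
  have h1 : ((PySem.List.dedup cs).map (fun c' => (c', p))).filter (fun q => q.1 == c)
      = ((PySem.List.dedup cs).filter (fun c' => c' == c)).map (fun c' => (c', p)) := by
    rw [List.filter_map]; rfl
  rw [h1, dedup_filter_beq cs c]
  by_cases h : cs.contains c <;> simp_all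

lemma buildParents_getD (graph : List (Int × List Int)) (c : Int) :
    (buildParents graph).getD c [] = get_parents graph c := by
  rw [get_parents_eq_filter_map]
  unfold buildParents
  suffices h : ∀ (g : List (Int × List Int)) (d : PySem.Dict Int (List Int)),
      (g.foldl (fun d pc => (PySem.List.dedup pc.2).foldl
          (fun d c' => d.modify c' [] (· ++ [pc.1])) d) d).getD c []
        = d.getD c [] ++ (g.filter (fun pc => pc.2.contains c)).map (·.1) by
    rw [h graph PySem.Dict.empty]; simp [PySem.Dict.getD_empty]
  intro g
  induction g with
  | nil => simp
  | cons pc rest ih =>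
    intro d
    simp only [List.foldl_cons]
    rw [ih, buildParents_inner pc.1 pc.2 d c]
    by_cases h : c ∈ pc.2 <;> simp [h]

lemma visitList_zero (pmap : PySem.Dict Int (List Int)) (Z : List Int) (l : List Int) :
    visitList pmap Z 0 l = ([], 0) := by
  cases l <;> simp [visitList]

lemma visitList_fuel_le (pmap : PySem.Dict Int (List Int)) (Z : List Int) :
    ∀ (f : Nat) (l : List Int), (visitList pmap Z f l).2 ≤ f := by
  intro f
  induction f using Nat.strong_induction_on with
  | _ f ih =>
    intro l
    match f, l with
    | f, [] => simp [visitList]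
    | 0, _ :: _ => simp [visitList]
    | f + 1, c :: rest =>
      simp only [visitList]
      have h2 := ih (min (visitList pmap Z f
        ((pmap.getD c []).reverse.filter (fun p => !(Z.contains p)))).2 f)
        (Nat.lt_succ_of_le (Nat.min_le_right _ _)) rest
      omega

-- the 'min' clamp disappears: the returned fuel never exceeds the given fuel
lemma visitList_cons (pmap : PySem.Dict Int (List Int)) (Z : List Int)
    (f : Nat) (c : Int) (rest : List Int) :
    visitList pmap Z (f + 1) (c :: rest) =
      (c :: ((visitList pmap Z f ((pmap.getD c []).reverse.filter (fun p => !(Z.contains p)))).1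
        ++ (visitList pmap Z
            (visitList pmap Z f ((pmap.getD c []).reverse.filter (fun p => !(Z.contains p)))).2
            rest).1),
       (visitList pmap Z
         (visitList pmap Z f ((pmap.getD c []).reverse.filter (fun p => !(Z.contains p)))).2
         rest).2) := by
  simp only [visitList]
  rw [Nat.min_eq_left (visitList_fuel_le pmap Z f _)]

lemma visitList_append (pmap : PySem.Dict Int (List Int)) (Z : List Int) :
    ∀ (x : List Int) (f : Nat) (y : List Int),
      visitList pmap Z f (x ++ y) =
        ((visitList pmap Z f x).1 ++ (visitList pmap Z (visitList pmap Z f x).2 y).1,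
         (visitList pmap Z (visitList pmap Z f x).2 y).2) := by
  intro x
  induction x with
  | nil => intro f y; simp [visitList]
  | cons c xs ih =>
    intro f y
    cases f with
    | zero => simp [visitList_zero]
    | succ f =>
      rw [List.cons_append, visitList_cons, visitList_cons, ih]
      simp [List.append_assoc]

lemma push_eq_filter_rev (Z : List Int) :
    ∀ (ps rest : List Int),
      ps.foldl (fun l p => if Z.contains p then l else p :: l) rest
        = (ps.reverse.filter (fun p => !(Z.contains p))) ++ rest := by
  intro ps
  induction ps with
  | nil => intro rest; simp
  | cons p ps ih =>
    intro rest
    simp only [List.foldl_cons, List.reverse_cons, List.filter_append]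
    rw [ih]
    by_cases h : p ∈ Z <;> simp [h]

lemma markLoopA_eq_visitList (graph : List (Int × List Int)) (Z : List Int)
    (A : List (List Int)) :
    ∀ (f : Nat) (l a : List Int),
      markLoopA graph Z A f l a = a ++ (visitList (buildParents graph) Z f l).1 := by
  intro f
  induction f with
  | zero => intro l a; simp [markLoopA, visitList_zero]
  | succ f ih =>
    intro l a
    cases l with
    | nil => simp [markLoopA, visitList]
    | cons C rest =>
      simp only [markLoopA, any_intEqList, Bool.false_eq_true, if_false]
      rw [push_eq_filter_rev, ih, visitList_cons, visitList_append, buildParents_getD]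
      simp

lemma foldl_mark_eq_map (graph : List (Int × List Int)) (Z : List Int) :
    ∀ (zs : List Int) (acc : List (List Int)),
      zs.foldl (fun A z => A ++ [markLoopA graph Z A (pvFuel graph) [z] []]) acc
        = acc ++ zs.map (fun z => (visitList (buildParents graph) Z (pvFuel graph) [z]).1) := by
  intro zs
  induction zs with
  | nil => intro acc; simp
  | cons z zs ih =>
    intro acc
    simp only [List.foldl_cons, List.map_cons]
    rw [markLoopA_eq_visitList, ih]
    simp

theorem mark_v_struct_eq_alt (graph : List (Int × List Int)) (Z : List Int) :
    mark_v_struct graph Z = mark_v_struct_alt graph Z := by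
  unfold mark_v_struct mark_v_struct_alt
  rw [foldl_mark_eq_map]
  simp

-- ===== VERDICT (by name: the statement is the Claim_ definition above) =====
theorem mark_v_struct_spec : Claim_equal_mark_v_struct := by
  intro graph Z _ _
  unfold Spec_mark_v_struct
  exact mark_v_struct_eq_alt graph Z
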